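-- pv_equiv track=rewrite | github.com/GidTheGreat/Trading-App | botutils/analyzer.py | resolve_combined_decision
-- ===== SOURCE A (Python) =====
-- from typing import Dict, Optional
--
-- def resolve_combined_decision(strategies: Dict[str, str]) -> Optional[str]:
--     """Strict decision resolution with validation."""
--     if not strategies:
--         return None
--
--     # Validate all decisions are PUT/CALL
--     valid_decisions = {"PUT", "CALL"}
--     decisions = []
--
--     for name, decision in strategies.items():
--         if decision not in valid_decisions:
--             return None
--         decisions.append(decision)
--
--     # Check consensus
--     unique_decisions = set(decisions)
--     return unique_decisions.pop() if len(unique_decisions) == 1 else None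
-- ===== SOURCE B (Python) =====
-- def resolve_combined_decision(strategies):
--     """Consensus-first: collapse all values to a set once, then validate the single survivor."""
--     values = set(strategies.values())
--     if len(values) == 1:
--         v = values.pop()
--         return v if v in ("PUT", "CALL") else None
--     return None
-- ===== Notes on version B (the rewrite author's own statement) =====
-- stated objective: simpler
-- what changed: Reorders A's validate-every-value-then-check-consensus loop into consensus-first: build the set of values once, and only if it is a singleton validate that one value with a single membership test.
import Mathlib
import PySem

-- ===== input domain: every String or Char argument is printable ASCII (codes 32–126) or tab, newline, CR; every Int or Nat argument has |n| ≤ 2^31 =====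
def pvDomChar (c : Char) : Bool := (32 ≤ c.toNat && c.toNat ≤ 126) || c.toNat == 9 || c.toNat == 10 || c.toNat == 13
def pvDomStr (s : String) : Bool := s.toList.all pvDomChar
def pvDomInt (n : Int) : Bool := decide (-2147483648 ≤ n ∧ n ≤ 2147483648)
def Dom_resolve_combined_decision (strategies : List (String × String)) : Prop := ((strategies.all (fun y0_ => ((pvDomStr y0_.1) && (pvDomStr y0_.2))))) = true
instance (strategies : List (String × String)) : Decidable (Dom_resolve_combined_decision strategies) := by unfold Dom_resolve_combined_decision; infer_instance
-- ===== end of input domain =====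

-- B reorders A's validate-then-consensus into consensus-then-validate: set of values first, one membership test.
-- ===== PORT A =====
-- 'for name, decision in strategies.items(): if decision not in valid_decisions: return None; decisions.append(decision)'
def pvLoopA : List (String × String) → List String → Option (List String)
  | [], acc => some acc
  | (_, decision) :: rest, acc =>
    if (decision == "PUT" || decision == "CALL") = false then none
    else pvLoopA rest (acc ++ [decision])

def resolve_combined_decision (strategies : List (String × String)) : Option String :=
  let d := PySem.Dict.ofList strategies
  if d.items.isEmpty then none          -- 'if not strategies: return None'
  else
    match pvLoopA d.items [] with
    | none => none                      -- early 'return None' inside the loop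
    | some decisions =>
      let unique_decisions := PySem.Set.ofList decisions
      -- 'unique_decisions.pop() if len(unique_decisions) == 1 else None' (pop on a 1-element set is its element)
      if unique_decisions.length = 1 then unique_decisions.head? else none

-- ===== PORT B =====
def resolve_combined_decision_alt (strategies : List (String × String)) : Option String :=
  let values := PySem.Set.ofList (PySem.Dict.ofList strategies).values
  match values with
  | [v] => if (v == "PUT" || v == "CALL") then some v else none   -- 'len == 1: pop, validate once'
  | _ => none

-- ===== PRECONDITION & SPEC =====
def Spec_resolve_combined_decision (strategies : List (String × String)) (out : Option String) : Prop := out = resolve_combined_decision_alt strategies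
instance (strategies : List (String × String)) (out : Option String) : Decidable (Spec_resolve_combined_decision strategies out) := by unfold Spec_resolve_combined_decision; infer_instance

-- ===== CLAIM (what is proved, stated in full; the proofs are below) =====
def Claim_equal_resolve_combined_decision : Prop := ∀ (strategies : List (String × String)), Dom_resolve_combined_decision strategies → Spec_resolve_combined_decision strategies (resolve_combined_decision strategies)

-- ===== LEMMAS AND PROOFS =====
-- The early-return loop of A, characterised: it succeeds iff every value is PUT/CALL,
-- and then returns the list of values appended to the accumulator.
theorem pvLoopA_eq (l : List (String × String)) (acc : List String) :
    pvLoopA l acc =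
      if l.all (fun p => p.2 == "PUT" || p.2 == "CALL") then some (acc ++ l.map (·.2)) else none := by
  induction l generalizing acc with
  | nil => simp [pvLoopA]
  | cons hd tl ih =>
    obtain ⟨k, v⟩ := hd
    by_cases hv : (v == "PUT" || v == "CALL") = true
    · simp [pvLoopA, hv, ih]
      split <;> simp_all
      exact fun a b h hne => ((‹∀ (a b : String), (a, b) ∈ tl → b = "PUT" ∨ b = "CALL"› a b h).resolve_left hne)
    · simp at hv
      simp [pvLoopA, hv]

-- ===== VERDICT (by name: the statement is the Claim_ definition above) =====
theorem resolve_combined_decision_spec : Claim_equal_resolve_combined_decision := by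
  intro strategies _
  unfold Spec_resolve_combined_decision resolve_combined_decision resolve_combined_decision_alt
  simp only [pvLoopA_eq (PySem.Dict.ofList strategies).items []]
  set items := (PySem.Dict.ofList strategies).items with hitems
  have hvals : (PySem.Dict.ofList strategies).values = items.map (·.2) := rfl
  rw [hvals]
  by_cases hall : items.all (fun p => p.2 == "PUT" || p.2 == "CALL") = true
  · simp only [hall, if_true, List.nil_append]
    rcases h1 : PySem.Set.ofList (items.map (·.2)) with _ | ⟨v, _ | ⟨w, tl⟩⟩
    · -- empty set of values ⇒ items = [] ⇒ A takes the isEmpty branch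
      have : items.map (·.2) = [] := by
        by_contra hne
        rcases List.exists_mem_of_ne_nil _ hne with ⟨x, hx⟩
        have : x ∈ PySem.Set.ofList (items.map (·.2)) := (PySem.Set.mem_ofList _ _).mpr hx
        simp [h1] at this
      have : items = [] := List.map_eq_nil_iff.mp this
      simp [this]
    · -- singleton: both return some v (v is valid since v ∈ values, all valid)
      have hmem : v ∈ items.map (·.2) := by
        have : v ∈ PySem.Set.ofList (items.map (·.2)) := by simp [h1]
        exact (PySem.Set.mem_ofList _ _).mp this
      rcases List.mem_map.mp hmem with ⟨p, hp, hpv⟩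
      have hv : (v == "PUT" || v == "CALL") = true := by
        have := List.all_eq_true.mp hall p hp
        rw [← hpv]; exact this
      have hne : items ≠ [] := by
        intro h; rw [h] at hmem; simp at hmem
      simp [hne, hv, h1]
    · -- ≥ 2 distinct values: both none
      have hne : items ≠ [] := by
        intro h
        rw [h] at h1; simp [PySem.Set.ofList] at h1
      simp [hne, h1]
  · -- some value invalid: A returns none via the loop; B's singleton (if any) is invalid
    simp only [hall]
    rw [Bool.not_eq_true] at hall
    have hne : items ≠ [] := by
      intro h; rw [h] at hall; simp at hall
    rcases h1 : PySem.Set.ofList (items.map (·.2)) with _ | ⟨v, _ | ⟨w, tl⟩⟩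
    · simp [hne, h1]
    · -- the invalid value is in the set, hence equals v, hence v invalid
      rcases List.all_eq_false.mp hall with ⟨p, hp, hpbad⟩
      have hmem : p.2 ∈ PySem.Set.ofList (items.map (·.2)) :=
        (PySem.Set.mem_ofList _ _).mpr (List.mem_map_of_mem hp)
      rw [h1] at hmem
      have hpv : p.2 = v := by simpa using hmem
      have hv : (v == "PUT" || v == "CALL") = false := by rw [← hpv]; simpa using hpbad
      simp [hne, hv, h1]
    · simp [hne, h1]
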